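-- pv_equiv track=rewrite | github.com/haris18s/Rosalind_Problems | Find_Spliced_motif/Finding_Spliced_Motif.py | find_subsequencs
-- ===== SOURCE A (Python) =====
-- def find_subsequencs(s,t, start =0, t_pointer = 0, current_match = None, results = None):
--
--     if current_match is None:
--         current_match = []
--     if results is None:
--         results = []
--     #if the t has atched store the current subsequences
--     if t_pointer == len(t):
--         #match has found
--         results.append(current_match[:])
--         return #go back to the previous recursive call
--
--     for i in range(start, len(s)):
--         if s[i] == t[t_pointer]:
--             current_match.append(i+1)
--             #recursively find futher matches
--             find_subsequencs(s,t,start =  i+1, t_pointer = t_pointer+1, current_match  = current_match,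
--                              results = results)
--             current_match.pop()
--
--
--     return results
-- ===== SOURCE B (Python) =====
-- def find_subsequencs(s, t, start=0, t_pointer=0, current_match=None, results=None):
--     if current_match is None:
--         current_match = []
--     if results is None:
--         results = []
--     if t_pointer == len(t):
--         results.append(current_match[:])
--         return
--     # iterative frontier of partial matches: (1-based indices chosen so far, next scan position)
--     frontier = [(current_match[:], start)]
--     k = t_pointer
--     while frontier and k != len(t):
--         new_frontier = []
--         for partial, nxt in frontier:
--             for i in range(nxt, len(s)):
--                 if s[i] == t[k]:
--                     new_frontier.append((partial + [i + 1], i + 1))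
--         frontier = new_frontier
--         k += 1
--     if k == len(t):
--         for partial, _ in frontier:
--             results.append(partial)
--     return results
-- ===== Notes on version B (the rewrite author's own statement) =====
-- stated objective: alternative
-- what changed: Replaces A's depth-first recursion (with in-place append/pop backtracking on current_match) by an iterative level-by-level worklist of partial matches that is extended once per remaining character of t, producing the same 1-based index lists in the same lexicographic order.
import Mathlib
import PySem

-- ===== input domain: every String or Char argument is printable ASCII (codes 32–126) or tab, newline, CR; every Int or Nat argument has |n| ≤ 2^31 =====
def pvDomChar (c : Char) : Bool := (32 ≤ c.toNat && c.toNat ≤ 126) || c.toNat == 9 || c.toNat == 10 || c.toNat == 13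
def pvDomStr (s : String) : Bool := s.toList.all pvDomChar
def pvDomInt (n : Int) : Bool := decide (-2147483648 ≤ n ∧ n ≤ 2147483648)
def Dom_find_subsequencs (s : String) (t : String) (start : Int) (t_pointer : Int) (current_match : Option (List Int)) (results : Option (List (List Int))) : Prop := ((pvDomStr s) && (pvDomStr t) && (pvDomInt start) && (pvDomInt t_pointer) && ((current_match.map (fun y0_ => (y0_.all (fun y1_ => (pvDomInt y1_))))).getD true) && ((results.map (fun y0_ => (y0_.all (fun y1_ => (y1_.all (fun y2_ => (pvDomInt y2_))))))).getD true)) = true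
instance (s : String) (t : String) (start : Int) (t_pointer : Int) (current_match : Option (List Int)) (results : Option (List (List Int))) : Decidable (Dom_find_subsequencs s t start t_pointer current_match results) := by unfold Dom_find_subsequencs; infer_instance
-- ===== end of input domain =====

-- B replaces A's depth-first recursion by an iterative level-by-level frontier (worklist) of
-- partial matches; same return value everywhere A returns a list (objective: alternative).
-- A mutates current_match in place and appends to results; equivalence here is about the
-- RETURN value only (B does not mutate its current_match argument).

-- ===== PORT A =====
-- s[i] == t[k] where either index may be out of range; false = no match (on admitted inputs
-- Python never reaches an out-of-range comparison, see Pre_).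
def pvCharEq (a b : Option Char) : Bool :=
  match a, b with
  | some x, some y => x == y
  | _, _ => false

-- termination helper for the ports: a successful comparison means t[k] was really there
theorem pvCharEq_lt (a : Option Char) (t : List Char) (k : Int)
    (h : pvCharEq a (PySem.List.pyGet? t k) = true) : k < (t.length : Int) := by
  by_contra hlt
  have hnone : PySem.List.pyGet? t k = none := by
    rw [PySem.List.pyGet?_eq_none_iff]
    intro hr
    exact hlt hr.2
  rw [hnone] at h
  cases a <;> simp [pvCharEq] at h

mutual
-- the recursive function itself: base case 't fully matched', else scan s from `start`
def pvAcall (s t : List Char) (start tp : Int) (cm : List Int) (res : List (List Int)) :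
    List (List Int) :=
  if tp = (t.length : Int) then res ++ [cm]
  else pvAloop s t tp cm res (PySem.List.pyRange start (s.length : Int))
termination_by (((t.length : Int) - tp).toNat, ((s.length : Int) - start).toNat + 1)
decreasing_by
  apply Prod.Lex.right
  rw [PySem.List.length_pyRange_one]
  omega

-- the 'for i in range(start, len(s))' loop of A
def pvAloop (s t : List Char) (tp : Int) (cm : List Int) (res : List (List Int)) :
    List Int → List (List Int)
  | [] => res
  | i :: rest =>
    if h : pvCharEq (PySem.List.pyGet? s i) (PySem.List.pyGet? t tp) = true then
      pvAloop s t tp cm (pvAcall s t (i + 1) (tp + 1) (cm ++ [i + 1]) res) rest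
    else
      pvAloop s t tp cm res rest
termination_by idxs => (((t.length : Int) - tp).toNat, idxs.length)
decreasing_by
  · apply Prod.Lex.left
    have := pvCharEq_lt _ t tp h
    omega
  · apply Prod.Lex.right
    simp
  · apply Prod.Lex.right
    simp
end

def find_subsequencs (s : String) (t : String) (start : Int) (t_pointer : Int) (current_match : Option (List Int)) (results : Option (List (List Int))) : List (List Int) :=
  pvAcall s.toList t.toList start t_pointer (current_match.getD []) (results.getD [])

-- ===== PORT B =====
-- one frontier-extension level: scan s for each partial, keeping s[i] == t[k] hits
def pvBext (s t : List Char) (k : Int) (fr : List (List Int × Int)) :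
    List (List Int × Int) :=
  fr.foldl
    (fun acc pr =>
      (PySem.List.pyRange pr.2 (s.length : Int)).foldl
        (fun acc2 i =>
          if pvCharEq (PySem.List.pyGet? s i) (PySem.List.pyGet? t k) then
            acc2 ++ [(pr.1 ++ [i + 1], i + 1)]
          else acc2)
        acc)
    []

-- termination helper for pvBloop: an out-of-range t[k] extends nothing
theorem pvBext_none_nil (s t : List Char) (k : Int) (fr : List (List Int × Int))
    (h : PySem.List.pyGet? t k = none) : pvBext s t k fr = [] := by
  unfold pvBext
  have hinner : ∀ (acc : List (List Int × Int)) (pr : List Int × Int), pr ∈ fr →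
      (PySem.List.pyRange pr.2 (s.length : Int)).foldl
        (fun acc2 i =>
          if pvCharEq (PySem.List.pyGet? s i) (PySem.List.pyGet? t k) then
            acc2 ++ [(pr.1 ++ [i + 1], i + 1)]
          else acc2) acc = acc := by
    intro acc pr _
    have hfalse : ∀ (i : Int), pvCharEq (PySem.List.pyGet? s i) (PySem.List.pyGet? t k) = false := by
      intro i
      rw [h]
      cases PySem.List.pyGet? s i <;> rfl
    calc (PySem.List.pyRange pr.2 (s.length : Int)).foldl
          (fun acc2 i =>
            if pvCharEq (PySem.List.pyGet? s i) (PySem.List.pyGet? t k) then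
              acc2 ++ [(pr.1 ++ [i + 1], i + 1)]
            else acc2) acc
        = (PySem.List.pyRange pr.2 (s.length : Int)).foldl (fun acc2 _ => acc2) acc := by
          apply PySem.List.foldl_congr_mem
          intro acc2 i _
          rw [hfalse i]
          simp
      _ = acc := PySem.List.foldl_ignore _ _
  calc fr.foldl
        (fun acc pr =>
          (PySem.List.pyRange pr.2 (s.length : Int)).foldl
            (fun acc2 i =>
              if pvCharEq (PySem.List.pyGet? s i) (PySem.List.pyGet? t k) then
                acc2 ++ [(pr.1 ++ [i + 1], i + 1)]
              else acc2) acc) []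
      = fr.foldl (fun acc _ => acc) [] := by
        apply PySem.List.foldl_congr_mem
        intro acc pr hpr
        exact hinner acc pr hpr
    _ = [] := PySem.List.foldl_ignore _ _

-- the 'while frontier and k != len(t)' loop of B; returns (final frontier, final k)
def pvBloop (s t : List Char) (fr : List (List Int × Int)) (k : Int) :
    List (List Int × Int) × Int :=
  if h : fr = [] ∨ k = (t.length : Int) then (fr, k)
  else pvBloop s t (pvBext s t k fr) (k + 1)
termination_by 2 * (((t.length : Int) - k).toNat) + (if fr = [] then 0 else 1)
decreasing_by
  push_neg at h
  by_cases hk : k < (t.length : Int)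
  · have h1 : (((t.length : Int) - (k + 1)).toNat) < (((t.length : Int) - k).toNat) := by omega
    have h2 : (if pvBext s t k fr = [] then 0 else 1) ≤ 1 := by split <;> omega
    have h3 : (if fr = [] then 0 else 1) = 1 := by simp [h.1]
    omega
  · have hnone : PySem.List.pyGet? t k = none := by
      rw [PySem.List.pyGet?_eq_none_iff]
      intro hr
      exact hk hr.2
    have h0 : pvBext s t k fr = [] := pvBext_none_nil s t k fr hnone
    have h1 : (((t.length : Int) - (k + 1)).toNat) = 0 := by omega
    have h3 : (if fr = [] then 0 else 1) = 1 := by simp [h.1]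
    simp [h0, h1, h3]

def find_subsequencs_alt (s : String) (t : String) (start : Int) (t_pointer : Int) (current_match : Option (List Int)) (results : Option (List (List Int))) : List (List Int) :=
  let cmL := current_match.getD []
  let resL := results.getD []
  if t_pointer = (t.toList.length : Int) then resL ++ [cmL]
  else
    let p := pvBloop s.toList t.toList [(cmL, start)] t_pointer
    if p.2 = (t.toList.length : Int) then resL ++ p.1.map (fun q => q.1) else resL

-- ===== PRECONDITION & SPEC =====
-- Pre_ is exactly the set of inputs on which the Python A returns a list: it excludes
-- t_pointer == len(t) (A returns None there) and the inputs where A raises an IndexError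
-- (a scan position below -len(s), or a t_pointer outside [-len(t), len(t)) while the scan
-- of s is nonempty).
def Pre_find_subsequencs (s : String) (t : String) (start : Int) (t_pointer : Int) (current_match : Option (List Int)) (results : Option (List (List Int))) : Prop :=
  t_pointer ≠ (t.toList.length : Int) ∧
    ((s.toList.length : Int) ≤ start ∨
      (-(s.toList.length : Int) ≤ start ∧ -(t.toList.length : Int) ≤ t_pointer ∧
        t_pointer < (t.toList.length : Int)))
instance (s : String) (t : String) (start : Int) (t_pointer : Int) (current_match : Option (List Int)) (results : Option (List (List Int))) : Decidable (Pre_find_subsequencs s t start t_pointer current_match results) := by unfold Pre_find_subsequencs; infer_instance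

def pvWitness_find_subsequencs : String × String × Int × Int × Option (List Int) × Option (List (List Int)) :=
  ("abab", "ab", 0, 0, none, none)

def Spec_find_subsequencs (s : String) (t : String) (start : Int) (t_pointer : Int) (current_match : Option (List Int)) (results : Option (List (List Int))) (out : List (List Int)) : Prop := out = find_subsequencs_alt s t start t_pointer current_match results
instance (s : String) (t : String) (start : Int) (t_pointer : Int) (current_match : Option (List Int)) (results : Option (List (List Int))) (out : List (List Int)) : Decidable (Spec_find_subsequencs s t start t_pointer current_match results out) := by unfold Spec_find_subsequencs; infer_instance

-- ===== CLAIM (what is proved, stated in full; the proofs are below) =====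
def Claim_equal_find_subsequencs : Prop := ∀ (s : String) (t : String) (start : Int) (t_pointer : Int) (current_match : Option (List Int)) (results : Option (List (List Int))), Dom_find_subsequencs s t start t_pointer current_match results → Pre_find_subsequencs s t start t_pointer current_match results → Spec_find_subsequencs s t start t_pointer current_match results (find_subsequencs s t start t_pointer current_match results)

-- ===== LEMMAS AND PROOFS =====

-- what one frontier level contributes for a single partial
def pvG (s t : List Char) (k : Int) (pr : List Int × Int) : List (List Int × Int) :=
  ((PySem.List.pyRange pr.2 (s.length : Int)).filter
      (fun i => pvCharEq (PySem.List.pyGet? s i) (PySem.List.pyGet? t k))).map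
    (fun i => (pr.1 ++ [i + 1], i + 1))

theorem pvBext_eq_flatMap (s t : List Char) (k : Int) (fr : List (List Int × Int)) :
    pvBext s t k fr = fr.flatMap (pvG s t k) := by
  unfold pvBext
  calc fr.foldl
        (fun acc pr =>
          (PySem.List.pyRange pr.2 (s.length : Int)).foldl
            (fun acc2 i =>
              if pvCharEq (PySem.List.pyGet? s i) (PySem.List.pyGet? t k) then
                acc2 ++ [(pr.1 ++ [i + 1], i + 1)]
              else acc2) acc) []
      = fr.foldl (fun acc pr => acc ++ pvG s t k pr) [] := by
        apply PySem.List.foldl_congr_mem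
        intro acc pr _
        exact PySem.List.foldl_append_if _ _ _ _
    _ = fr.flatMap (pvG s t k) := by
        rw [PySem.List.foldl_append_eq_flatMap]
        simp

-- the full cascade of frontier levels from k up to len(t)
def pvLF (s t : List Char) (fr : List (List Int × Int)) (k : Int) : List (List Int × Int) :=
  (PySem.List.pyRange k (t.length : Int)).foldl (fun f k' => pvBext s t k' f) fr

theorem pvLF_of_ge (s t : List Char) (fr : List (List Int × Int)) (k : Int)
    (h : (t.length : Int) ≤ k) : pvLF s t fr k = fr := by
  unfold pvLF
  rw [PySem.List.pyRange_one_eq_nil h]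
  rfl

theorem pvLF_cons (s t : List Char) (fr : List (List Int × Int)) (k : Int)
    (h : k < (t.length : Int)) : pvLF s t fr k = pvLF s t (pvBext s t k fr) (k + 1) := by
  unfold pvLF
  rw [PySem.List.pyRange_one_cons h]
  rfl

theorem pvLF_nil (s t : List Char) (k : Int) : pvLF s t [] k = [] := by
  unfold pvLF
  generalize PySem.List.pyRange k (t.length : Int) = ks
  induction ks with
  | nil => rfl
  | cons k' ks ih =>
    rw [List.foldl_cons]
    have h0 : pvBext s t k' [] = [] := by rw [pvBext_eq_flatMap]; rfl
    rw [h0]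
    exact ih

theorem pvLF_flat (s t : List Char) : ∀ (n : Nat) (k : Int) (fr : List (List Int × Int)),
    (((t.length : Int) - k).toNat) = n →
    pvLF s t fr k = fr.flatMap (fun pr => pvLF s t [pr] k) := by
  intro n
  induction n with
  | zero =>
    intro k fr hn
    have hk : (t.length : Int) ≤ k := by omega
    rw [pvLF_of_ge s t fr k hk]
    have : (fun pr => pvLF s t [pr] k) = fun pr => [pr] := by
      funext pr
      exact pvLF_of_ge s t [pr] k hk
    rw [this]
    simp
  | succ m ih =>
    intro k fr hn
    have hk : k < (t.length : Int) := by omega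
    have ih' : ∀ fr', pvLF s t fr' (k + 1) = fr'.flatMap (fun pr => pvLF s t [pr] (k + 1)) := by
      intro fr'
      exact ih (k + 1) fr' (by omega)
    rw [pvLF_cons s t fr k hk, ih', pvBext_eq_flatMap, List.flatMap_assoc]
    have : (fun pr => pvLF s t [pr] k) =
        fun pr => (pvG s t k pr).flatMap (fun pr' => pvLF s t [pr'] (k + 1)) := by
      funext pr
      rw [pvLF_cons s t [pr] k hk, pvBext_eq_flatMap, List.flatMap_singleton, ih']
    rw [this]

-- B's loop + final 'if k == len(t)' computes the level cascade
theorem pvBloop_result (s t : List Char) : ∀ (n : Nat) (k : Int) (fr : List (List Int × Int))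
    (resL : List (List Int)),
    (((t.length : Int) - k).toNat) = n → -(t.length : Int) ≤ k → k ≤ (t.length : Int) →
    (if (pvBloop s t fr k).2 = (t.length : Int) then
        resL ++ (pvBloop s t fr k).1.map (fun q => q.1)
      else resL) = resL ++ (pvLF s t fr k).map (fun q => q.1) := by
  intro n
  induction n with
  | zero =>
    intro k fr resL hn _ hle
    have hk : k = (t.length : Int) := by omega
    rw [pvBloop]
    simp [hk, pvLF_of_ge]
  | succ m ih =>
    intro k fr resL hn hge hle
    have hk : k < (t.length : Int) := by omega
    by_cases hfr : fr = []
    · subst hfr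
      rw [pvBloop]
      simp only [true_or, dif_pos]
      rw [pvLF_nil]
      simp [(show ¬ k = (t.length : Int) by omega)]
    · rw [pvBloop]
      have hcond : ¬ (fr = [] ∨ k = (t.length : Int)) := by
        push_neg
        exact ⟨hfr, by omega⟩
      rw [dif_neg hcond]
      rw [ih (k + 1) (pvBext s t k fr) resL (by omega) (by omega) (by omega)]
      rw [pvLF_cons s t fr k hk]

-- A's recursion computes the same cascade, started from a single partial
theorem pvMain (s t : List Char) : ∀ (n : Nat) (tp start : Int) (cm : List Int)
    (res : List (List Int)),
    (((t.length : Int) - tp).toNat) = n → -(t.length : Int) ≤ tp → tp ≤ (t.length : Int) →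
    -(s.length : Int) ≤ start →
    pvAcall s t start tp cm res = res ++ (pvLF s t [(cm, start)] tp).map (fun q => q.1) := by
  intro n
  induction n with
  | zero =>
    intro tp start cm res hn _ hle _
    have htp : tp = (t.length : Int) := by omega
    rw [pvAcall]
    simp [htp, pvLF_of_ge]
  | succ m ih =>
    intro tp start cm res hn hge hle hstart
    have htp : tp < (t.length : Int) := by omega
    rw [pvAcall, if_neg (by omega)]
    -- characterize A's scan loop
    have hAloop : ∀ (idxs : List Int) (res' : List (List Int)),
        (∀ i ∈ idxs, -(s.length : Int) ≤ i) →
        pvAloop s t tp cm res' idxs =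
          res' ++ ((idxs.filter
              (fun i => pvCharEq (PySem.List.pyGet? s i) (PySem.List.pyGet? t tp))).flatMap
            (fun i => (pvLF s t [(cm ++ [i + 1], i + 1)] (tp + 1)).map (fun q => q.1))) := by
      intro idxs
      induction idxs with
      | nil => intro res' _; simp [pvAloop]
      | cons i rest ihr =>
        intro res' hmem
        rw [pvAloop]
        by_cases hc : pvCharEq (PySem.List.pyGet? s i) (PySem.List.pyGet? t tp) = true
        · rw [dif_pos hc]
          rw [ihr _ (fun j hj => hmem j (List.mem_cons_of_mem _ hj))]
          rw [ih (tp + 1) (i + 1) (cm ++ [i + 1]) res' (by omega) (by omega) (by omega)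
            (by have := hmem i (by simp); omega)]
          simp [List.filter_cons, hc, List.append_assoc]
        · rw [dif_neg hc]
          rw [ihr _ (fun j hj => hmem j (List.mem_cons_of_mem _ hj))]
          simp [List.filter_cons, Bool.of_not_eq_true hc]
    rw [hAloop _ res (by
      intro i hi
      rw [PySem.List.mem_pyRange_one] at hi
      omega)]
    -- B's side: peel one level and flatten
    rw [pvLF_cons s t _ tp htp, pvBext_eq_flatMap, List.flatMap_singleton]
    rw [pvLF_flat s t (((t.length : Int) - (tp + 1)).toNat) (tp + 1) _ rfl]
    unfold pvG
    rw [List.flatMap_map, List.map_flatMap]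

-- ===== VERDICT (by name: the statement is the Claim_ definition above) =====
theorem find_subsequencs_spec : Claim_equal_find_subsequencs := by
  intro s t start tp cm res _ hpre
  unfold Spec_find_subsequencs find_subsequencs find_subsequencs_alt
  obtain ⟨hne, hcase⟩ := hpre
  rw [if_neg hne]
  rcases hcase with hbig | ⟨hs, htl, htu⟩
  · -- start is at or past the end of s: the scan is empty on both sides
    rw [pvAcall, if_neg hne, PySem.List.pyRange_one_eq_nil hbig, pvAloop]
    rw [pvBloop, dif_neg (fun hor => hor.elim (fun h => by simp at h) (fun h => hne h))]
    have h0 : pvBext s.toList t.toList tp [(cm.getD [], start)] = [] := by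
      rw [pvBext_eq_flatMap, List.flatMap_singleton]
      unfold pvG
      rw [PySem.List.pyRange_one_eq_nil hbig]
      rfl
    rw [h0, pvBloop]
    simp only [true_or, dif_pos]
    split <;> simp
  · -- the main case: DFS recursion = frontier cascade
    rw [pvMain s.toList t.toList (((t.toList.length : Int) - tp).toNat) tp start
      (cm.getD []) (res.getD []) rfl htl (by omega) hs]
    rw [pvBloop_result s.toList t.toList (((t.toList.length : Int) - tp).toNat) tp
      [(cm.getD [], start)] (res.getD []) rfl htl (by omega)]
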